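-- pv_equiv track=rewrite | github.com/RajalNaqvi/rajal-lab | problems-practice/class-monitor.py | count_rank_cuts
-- ===== SOURCE A (Python) =====
-- def count_rank_cuts(ranks):
--     # Initialize stack and cuts counter
--     stack = []
--     cuts = 0
--
--     for rank in ranks:
--         while stack and stack[-1] > rank:
--             cuts += 1
--             stack.pop()
--         if stack:
--             stack.pop()
--         stack.append(rank)
--
--     return cuts
-- ===== SOURCE B (Python) =====
-- def count_rank_cuts(ranks):
--     # Declarative, staged formulation: pair each rank with its successor
--     # via zip, then count the strict descents among those pairs.
--     xs = list(ranks)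
--     return sum(1 for a, b in zip(xs, xs[1:]) if a > b)
-- ===== Notes on version B (the rewrite author's own statement) =====
-- stated objective: idiomatic
-- what changed: Replaced A's imperative stack machine (inner while-loop, pop/append state) with a loop-free staged pipeline: zip the list with its own tail and count the descending pairs with a generator sum.
import Mathlib
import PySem

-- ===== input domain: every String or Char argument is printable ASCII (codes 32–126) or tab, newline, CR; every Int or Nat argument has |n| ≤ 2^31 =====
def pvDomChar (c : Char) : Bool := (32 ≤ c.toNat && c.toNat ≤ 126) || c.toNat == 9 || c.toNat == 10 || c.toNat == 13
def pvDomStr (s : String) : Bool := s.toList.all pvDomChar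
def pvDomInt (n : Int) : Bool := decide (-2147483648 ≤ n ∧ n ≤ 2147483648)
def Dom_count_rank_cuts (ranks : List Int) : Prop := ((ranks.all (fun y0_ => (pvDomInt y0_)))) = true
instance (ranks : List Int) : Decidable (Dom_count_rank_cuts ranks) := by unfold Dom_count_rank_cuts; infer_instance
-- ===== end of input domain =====

-- B replaces A's imperative stack machine by a loop-free staged pipeline:
-- zip the list with its tail and count descending pairs (objective: idiomatic).

-- ===== PORT A =====
-- the inner 'while stack and stack[-1] > rank' loop; stack head = Python's stack[-1]
def crcWhile (stack : List Int) (cuts : Int) (rank : Int) : List Int × Int :=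
  match stack with
  | [] => ([], cuts)
  | t :: rest => if t > rank then crcWhile rest (cuts + 1) rank else (t :: rest, cuts)

def count_rank_cuts (ranks : List Int) : Int :=
  (ranks.foldl (fun st rank =>
    let (stack, cuts) := crcWhile st.1 st.2 rank
    let stack := match stack with       -- if stack: stack.pop()
      | [] => []
      | _ :: rest => rest
    (rank :: stack, cuts)) ([], 0)).2   -- stack.append(rank)

-- ===== PORT B =====
-- sum(1 for a, b in zip(xs, xs[1:]) if a > b)
def count_rank_cuts_alt (ranks : List Int) : Int :=
  (((ranks.zip (PySem.List.slice ranks (some 1) none)).filter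
      (fun p => decide (p.1 > p.2))).length : Int)

-- ===== PRECONDITION & SPEC =====
def Spec_count_rank_cuts (ranks : List Int) (out : Int) : Prop := out = count_rank_cuts_alt ranks
instance (ranks : List Int) (out : Int) : Decidable (Spec_count_rank_cuts ranks out) := by unfold Spec_count_rank_cuts; infer_instance

-- ===== CLAIM (what is proved, stated in full; the proofs are below) =====
def Claim_equal_count_rank_cuts : Prop := ∀ (ranks : List Int), Dom_count_rank_cuts ranks → Spec_count_rank_cuts ranks (count_rank_cuts ranks)

-- ===== LEMMAS AND PROOFS =====
def crcStepA (st : List Int × Int) (rank : Int) : List Int × Int :=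
  let (stack, cuts) := crcWhile st.1 st.2 rank
  let stack := match stack with
    | [] => []
    | _ :: rest => rest
  (rank :: stack, cuts)

-- reference count of adjacent descents, with 'p' the previous element
def crcDesc (p : Int) : List Int → Int
  | [] => 0
  | r :: t => (if p > r then 1 else 0) + crcDesc r t

theorem crc_foldA (l : List Int) (p c : Int) :
    (l.foldl crcStepA ([p], c)).2 = c + crcDesc p l := by
  induction l generalizing p c with
  | nil => simp [crcDesc]
  | cons r t ih =>
    by_cases hpr : p > r
    · simp [List.foldl, crcStepA, crcWhile, hpr, ih, crcDesc]; ring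
    · simp [List.foldl, crcStepA, crcWhile, hpr, ih, crcDesc]

theorem crc_zipB (p : Int) (l : List Int) :
    (((p :: l).zip l).filter (fun q => decide (q.1 > q.2))).length = crcDesc p l := by
  induction l generalizing p with
  | nil => simp [crcDesc]
  | cons r t ih =>
    by_cases hpr : p > r
    · simp [List.zip_cons_cons, hpr, crcDesc, ← ih]; omega
    · simp [List.zip_cons_cons, hpr, crcDesc, ← ih]

-- ===== VERDICT (by name: the statement is the Claim_ definition above) =====
theorem count_rank_cuts_spec : Claim_equal_count_rank_cuts := by
  intro ranks _
  show count_rank_cuts ranks = count_rank_cuts_alt ranks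
  cases ranks with
  | nil => rfl
  | cons x t =>
    have hslice : PySem.List.slice (x :: t) (some 1) none = t := by
      simp [PySem.List.slice_from_one]
    have hA : count_rank_cuts (x :: t) = 0 + crcDesc x t := by
      simpa [count_rank_cuts, List.foldl, crcStepA, crcWhile] using crc_foldA t x 0
    simp [count_rank_cuts_alt, hslice, crc_zipB, hA]
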